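-- pv_equiv track=rewrite | github.com/MelKatya/Encryptly | fastapi_application/crypto/des_custom.py | text_to_bit_blocks
-- ===== SOURCE A (Python) =====
-- def text_to_bit_blocks(text: str) -> list[list[int]]:
--     encoded_text = text.encode()
--     bit_blocks = []
--
--     for idx in range(0, len(encoded_text), 8):
--         block = encoded_text[idx:idx + 8]
--         if len(block) == 8:
--             block_to_int = int.from_bytes(block)
--             bit_blocks.append([int(block) for block in format(block_to_int, '064b')])
--         else:
--             rest = 8 - len(block)
--             block += bytes([rest]) * rest
--             block_to_int = int.from_bytes(block)
--             bit_blocks.append([int(block) for block in format(block_to_int, '064b')])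
--
--     return bit_blocks
-- ===== SOURCE B (Python) =====
-- def text_to_bit_blocks(text: str) -> list[list[int]]:
--     data = text.encode()
--     if len(data) % 8 != 0:
--         rest = 8 - len(data) % 8
--         data += bytes([rest]) * rest
--     return [[(b >> k) & 1 for b in data[i:i + 8] for k in range(7, -1, -1)]
--             for i in range(0, len(data), 8)]
-- ===== Notes on version B (the rewrite author's own statement) =====
-- stated objective: simpler
-- what changed: B pads the byte string once up front and then expands each 8-byte block byte-by-byte with shift-and-mask bit extraction, instead of A's per-block padding plus int.from_bytes and 64-character binary string formatting and per-character int().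
import Mathlib
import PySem

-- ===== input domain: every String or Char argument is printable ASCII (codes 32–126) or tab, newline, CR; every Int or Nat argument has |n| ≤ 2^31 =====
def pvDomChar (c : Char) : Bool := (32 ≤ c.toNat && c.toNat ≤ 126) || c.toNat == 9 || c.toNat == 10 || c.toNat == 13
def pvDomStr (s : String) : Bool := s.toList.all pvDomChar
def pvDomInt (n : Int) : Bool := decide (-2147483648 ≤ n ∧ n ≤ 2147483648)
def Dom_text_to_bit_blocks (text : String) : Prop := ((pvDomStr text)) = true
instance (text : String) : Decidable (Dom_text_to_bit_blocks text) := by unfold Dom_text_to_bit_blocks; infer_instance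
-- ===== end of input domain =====

-- B pads the byte string once up front and expands blocks byte-by-byte with shift/mask,
-- replacing A's per-block padding + int.from_bytes + zero-padded binary string formatting (objective: simpler).

-- ===== PORT A =====
-- text.encode(): on the Dom_ alphabet (ASCII) the UTF-8 bytes are exactly the char codes (exact there)
def pvEncode (text : String) : List Nat := text.toList.map Char.toNat

-- int.from_bytes(block) (big-endian, unsigned: Python's default)
def pvFromBytes (bs : List Nat) : Nat := bs.foldl (fun a b => a * 256 + b) 0

-- binary digits of n, most significant first; format(n,'b') is '0' for n = 0, but after
-- zero-padding to width 64 the empty digit list below yields the same 64 characters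
def pvNatBits (n : Nat) : List Nat :=
  if _h : n = 0 then [] else pvNatBits (n / 2) ++ [n % 2]
decreasing_by exact Nat.div_lt_self (Nat.pos_of_ne_zero _h) one_lt_two

-- [int(c) for c in format(block_to_int, '064b')]
def pvBits64 (n : Nat) : List Int :=
  (List.replicate (64 - (pvNatBits n).length) 0 ++ pvNatBits n).map (fun d => Int.ofNat d)

-- for idx in range(0, len(encoded_text), 8): block = encoded_text[idx:idx+8]; …
def pvLoopA (bs : List Nat) : List (List Int) :=
  if _h : bs = [] then []
  else
    let block := bs.take 8
    if block.length = 8 then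
      pvBits64 (pvFromBytes block) :: pvLoopA (bs.drop 8)
    else
      let rest := 8 - block.length
      [pvBits64 (pvFromBytes (block ++ List.replicate rest rest))]
termination_by bs.length
decreasing_by
  simp only [List.length_drop]
  have := List.length_pos_of_ne_nil _h
  omega

def text_to_bit_blocks (text : String) : List (List Int) := pvLoopA (pvEncode text)

-- ===== PORT B =====
-- B's own text.encode(): char codes, exact on the Dom_ (ASCII) alphabet
def pvEncodeB (text : String) : List Nat := text.toList.map Char.toNat

-- [(b >> k) & 1 for k in range(7, -1, -1)]
def pvBits8 (b : Nat) : List Int :=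
  (PySem.List.pyRange 7 (-1) (-1)).map (fun k => (((b >>> k.toNat) &&& 1 : Nat) : Int))

-- the one up-front padding pass
def pvPad (bs : List Nat) : List Nat :=
  if bs.length % 8 ≠ 0 then
    let rest := 8 - bs.length % 8
    bs ++ List.replicate rest rest
  else bs

-- [[… for b in data[i:i+8] …] for i in range(0, len(data), 8)]
def pvLoopB (bs : List Nat) : List (List Int) :=
  if _h : bs = [] then []
  else (bs.take 8).flatMap pvBits8 :: pvLoopB (bs.drop 8)
termination_by bs.length
decreasing_by
  simp only [List.length_drop]
  have := List.length_pos_of_ne_nil _h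
  omega

def text_to_bit_blocks_alt (text : String) : List (List Int) :=
  pvLoopB (pvPad (pvEncodeB text))

-- ===== PRECONDITION & SPEC =====
def Spec_text_to_bit_blocks (text : String) (out : List (List Int)) : Prop := out = text_to_bit_blocks_alt text
instance (text : String) (out : List (List Int)) : Decidable (Spec_text_to_bit_blocks text out) := by unfold Spec_text_to_bit_blocks; infer_instance

-- ===== CLAIM (what is proved, stated in full; the proofs are below) =====
def Claim_equal_text_to_bit_blocks : Prop := ∀ (text : String), Dom_text_to_bit_blocks text → Spec_text_to_bit_blocks text (text_to_bit_blocks text)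

-- ===== LEMMAS AND PROOFS =====

-- the low m bits of n, most significant first (proof-side canonical form)
def pvBitsOf (m n : Nat) : List Nat := (List.range m).map (fun i => (n >>> (m - 1 - i)) % 2)

lemma pvBitsOf_succ (m n : Nat) : pvBitsOf (m + 1) n = pvBitsOf m (n / 2) ++ [n % 2] := by
  unfold pvBitsOf
  rw [List.range_succ, List.map_append]
  congr 1
  · apply List.map_congr_left
    intro i hi
    rw [List.mem_range] at hi
    have h1 : m + 1 - 1 - i = 1 + (m - 1 - i) := by omega
    rw [h1, Nat.shiftRight_add, Nat.shiftRight_one]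
  · simp

lemma pvBitsOf_add (m k n : Nat) : pvBitsOf (m + k) n = pvBitsOf m (n >>> k) ++ pvBitsOf k n := by
  induction k generalizing n with
  | zero => simp [pvBitsOf]
  | succ k ih =>
    have : m + (k + 1) = (m + k) + 1 := by omega
    rw [this, pvBitsOf_succ, ih, pvBitsOf_succ, List.append_assoc]
    congr 2
    rw [← Nat.shiftRight_one, ← Nat.shiftRight_add, Nat.add_comm 1 k]

lemma pvBitsOf_mod (k n : Nat) : pvBitsOf k (n % 2 ^ k) = pvBitsOf k n := by
  unfold pvBitsOf
  apply List.map_congr_left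
  intro i hi
  rw [List.mem_range] at hi
  have hj : k - 1 - i < k := by omega
  set j := k - 1 - i with hjdef
  rw [Nat.shiftRight_eq_div_pow, Nat.shiftRight_eq_div_pow]
  have hsplit : 2 ^ k = 2 ^ j * 2 ^ (k - j) := by
    rw [← pow_add]; congr 1; omega
  rw [hsplit, Nat.mod_mul_right_div_self]
  have hdvd : (2 : Nat) ∣ 2 ^ (k - j) := dvd_pow_self 2 (by omega)
  rw [Nat.mod_mod_of_dvd _ hdvd]

lemma pvNatBits_length_le (m n : Nat) (h : n < 2 ^ m) : (pvNatBits n).length ≤ m := by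
  induction m generalizing n with
  | zero =>
    have : n = 0 := by omega
    subst this; rw [pvNatBits]; simp
  | succ m ih =>
    by_cases h0 : n = 0
    · subst h0; rw [pvNatBits]; simp
    · rw [pvNatBits]; simp [h0]
      have : n / 2 < 2 ^ m := by
        rw [pow_succ] at h; omega
      exact ih _ this

lemma pvPadBits_eq_bitsOf (m n : Nat) (h : n < 2 ^ m) :
    List.replicate (m - (pvNatBits n).length) 0 ++ pvNatBits n = pvBitsOf m n := by
  induction m generalizing n with
  | zero =>
    have : n = 0 := by omega
    subst this; rw [pvNatBits]; simp [pvBitsOf]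
  | succ m ih =>
    have hdiv : n / 2 < 2 ^ m := by rw [pow_succ] at h; omega
    rw [pvBitsOf_succ]
    by_cases h0 : n = 0
    · subst h0
      rw [pvNatBits]
      simp only [dite_eq_ite, if_pos]
      rw [← ih 0 (by positivity)]
      rw [pvNatBits]
      simp [List.replicate_succ']
    · rw [pvNatBits]; simp only [h0, dite_false]
      have hlen : (pvNatBits (n / 2)).length ≤ m := pvNatBits_length_le m _ hdiv
      rw [← ih _ hdiv]
      rw [List.length_append, List.length_singleton]
      have harith : m + 1 - ((pvNatBits (n / 2)).length + 1) = m - (pvNatBits (n / 2)).length := by omega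
      rw [harith, ← List.append_assoc]

lemma pvBits8_eq_bitsOf (b : Nat) : pvBits8 b = (pvBitsOf 8 b).map (fun d => Int.ofNat d) := by
  have hr : PySem.List.pyRange 7 (-1) (-1) = [7, 6, 5, 4, 3, 2, 1, 0] := by decide
  unfold pvBits8 pvBitsOf
  rw [hr]
  simp [List.range_succ, Nat.and_one_is_mod]

lemma pvFromBytes_append (bs : List Nat) (b : Nat) :
    pvFromBytes (bs ++ [b]) = pvFromBytes bs * 256 + b := by
  unfold pvFromBytes; rw [List.foldl_append]; rfl

lemma pvFromBytes_lt (bs : List Nat) (h : ∀ b ∈ bs, b < 256) :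
    pvFromBytes bs < 2 ^ (8 * bs.length) := by
  induction bs using List.reverseRecOn with
  | nil => simp [pvFromBytes]
  | append_singleton bs b ih =>
    rw [pvFromBytes_append]
    have hb : b < 256 := h b (by simp)
    have hbs : pvFromBytes bs < 2 ^ (8 * bs.length) := ih (fun x hx => h x (by simp [hx]))
    have hl : 8 * (bs ++ [b]).length = 8 * bs.length + 8 := by
      simp [List.length_append]; ring
    rw [hl, pow_add]
    have h256 : (2 : Nat) ^ 8 = 256 := by norm_num
    rw [h256]; nlinarith

lemma pvBitsOf_fromBytes (bs : List Nat) (h : ∀ b ∈ bs, b < 256) :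
    pvBitsOf (8 * bs.length) (pvFromBytes bs) = bs.flatMap (fun b => pvBitsOf 8 b) := by
  induction bs using List.reverseRecOn with
  | nil => simp [pvBitsOf, pvFromBytes]
  | append_singleton bs b ih =>
    have hb : b < 256 := h b (by simp)
    have hrec := ih (fun x hx => h x (by simp [hx]))
    rw [pvFromBytes_append]
    have hlen : 8 * (bs ++ [b]).length = 8 * bs.length + 8 := by
      simp [List.length_append]; ring
    rw [hlen, pvBitsOf_add]
    have hsh : (pvFromBytes bs * 256 + b) >>> 8 = pvFromBytes bs := by
      rw [Nat.shiftRight_eq_div_pow]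
      omega
    have hlow : pvBitsOf 8 (pvFromBytes bs * 256 + b) = pvBitsOf 8 b := by
      rw [← pvBitsOf_mod 8 (pvFromBytes bs * 256 + b), ← pvBitsOf_mod 8 b]
      congr 1
      have : (2 : Nat) ^ 8 = 256 := by norm_num
      rw [this]
      omega
    rw [hsh, hlow, hrec, List.flatMap_append]
    simp

-- maps the Int cast through the byte-wise expansion (specific to these programs)
lemma pvCast_flatMap (l : List Nat) :
    (l.flatMap (fun b => pvBitsOf 8 b)).map (fun d => Int.ofNat d) = l.flatMap pvBits8 := by
  induction l with
  | nil => rfl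
  | cons a l ih => rw [List.flatMap_cons, List.map_append, ih, List.flatMap_cons, pvBits8_eq_bitsOf]

-- one 8-byte block: A's format-based bits equal B's byte-wise bits
lemma pvBlock_eq (bs : List Nat) (hlen : bs.length = 8) (h : ∀ b ∈ bs, b < 256) :
    pvBits64 (pvFromBytes bs) = bs.flatMap pvBits8 := by
  have hlt : pvFromBytes bs < 2 ^ 64 := by
    have := pvFromBytes_lt bs h
    rw [hlen] at this
    exact this
  unfold pvBits64
  rw [pvPadBits_eq_bitsOf 64 _ hlt]
  have h64 : (64 : Nat) = 8 * bs.length := by rw [hlen]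
  rw [h64, pvBitsOf_fromBytes bs h, pvCast_flatMap]

lemma pvPad_take (bs : List Nat) (h : 8 ≤ bs.length) : (pvPad bs).take 8 = bs.take 8 := by
  unfold pvPad
  split_ifs with hm
  · exact List.take_append_of_le_length h
  · rfl

lemma pvPad_drop (bs : List Nat) (h : 8 ≤ bs.length) : (pvPad bs).drop 8 = pvPad (bs.drop 8) := by
  unfold pvPad
  have hlen : (bs.drop 8).length = bs.length - 8 := by simp
  have hmod : (bs.drop 8).length % 8 = bs.length % 8 := by rw [hlen]; omega
  split_ifs with hm hm2 hm2
  · rw [List.drop_append_of_le_length h, hmod]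
  · exact absurd (hmod ▸ hm) hm2
  · exact absurd (hmod.symm ▸ hm2) hm
  · rfl

lemma pvPad_ne_nil (bs : List Nat) (h : bs ≠ []) : pvPad bs ≠ [] := by
  unfold pvPad
  split_ifs with hm
  · simp [h]
  · exact h

theorem pvMain : ∀ (n : Nat) (bs : List Nat), bs.length ≤ n → (∀ b ∈ bs, b < 256) →
    pvLoopA bs = pvLoopB (pvPad bs) := by
  intro n
  induction n with
  | zero =>
    intro bs hn _
    have hbs : bs = [] := List.eq_nil_of_length_eq_zero (by omega)
    subst hbs
    rw [pvLoopA, pvLoopB]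
    simp [pvPad]
  | succ n ih =>
    intro bs hn h
    by_cases hnil : bs = []
    · subst hnil
      rw [pvLoopA, pvLoopB]
      simp [pvPad]
    · have hpos : 0 < bs.length := List.length_pos_of_ne_nil hnil
      by_cases h8 : 8 ≤ bs.length
      · have htake : (bs.take 8).length = 8 := by
          simp only [List.length_take]; omega
        rw [pvLoopA, pvLoopB, dif_neg hnil, dif_neg (pvPad_ne_nil bs hnil)]
        simp only [htake, if_pos]
        rw [pvPad_take bs h8, pvPad_drop bs h8]
        congr 1
        · exact pvBlock_eq _ htake (fun b hb => h b (List.mem_of_mem_take hb))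
        · apply ih
          · simp only [List.length_drop]; omega
          · exact fun b hb => h b (List.mem_of_mem_drop hb)
      · replace h8 : bs.length < 8 := by omega
        have htake : bs.take 8 = bs := List.take_of_length_le (by omega)
        have hmod : bs.length % 8 = bs.length := Nat.mod_eq_of_lt h8
        have hpadded : pvPad bs =
            bs ++ List.replicate (8 - bs.length) (8 - bs.length) := by
          unfold pvPad
          rw [if_pos (by omega), hmod]
        have hplen : (pvPad bs).length = 8 := by
          rw [hpadded]; simp only [List.length_append, List.length_replicate]; omega
        rw [pvLoopA, pvLoopB, dif_neg hnil, dif_neg (pvPad_ne_nil bs hnil)]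
        simp only [htake]
        rw [if_neg (by omega : ¬ bs.length = 8)]
        rw [List.take_of_length_le (by omega), List.drop_eq_nil_of_le (by omega)]
        rw [pvLoopB]
        simp only [dif_pos]
        rw [hpadded]
        congr 1
        apply pvBlock_eq
        · simp only [List.length_append, List.length_replicate]; omega
        · intro x hx
          rcases List.mem_append.mp hx with hx | hx
          · exact h x hx
          · have := List.eq_of_mem_replicate hx
            omega

-- ===== VERDICT (by name: the statement is the Claim_ definition above) =====
theorem text_to_bit_blocks_spec : Claim_equal_text_to_bit_blocks := by
  intro text hdom
  unfold Spec_text_to_bit_blocks text_to_bit_blocks text_to_bit_blocks_alt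
  rw [show pvEncodeB text = pvEncode text from rfl]
  apply pvMain (pvEncode text).length (pvEncode text) le_rfl
  intro b hb
  unfold pvEncode at hb
  rw [List.mem_map] at hb
  obtain ⟨c, hc, rfl⟩ := hb
  unfold Dom_text_to_bit_blocks pvDomStr at hdom
  rw [List.all_eq_true] at hdom
  have := hdom c hc
  unfold pvDomChar at this
  simp at this
  omega
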